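-- pv_equiv track=rewrite | github.com/verzep/python_for_neuroscience | Day_4/project_C/ephys.py | count_spikes
-- ===== SOURCE A (Python) =====
-- def count_spikes(spike_times, max_interval=15):
--     """
--     Given an array of spike times, this method clusters them based on a maximum allowed time interval.
--
--     Args:
--         spike_times: an array of spike_times
--         max_interval: maximum allowed ISI such that spikes within this range are clustered together
--
--     Returns:
--         spike_counts (dict): a dictionary mapping the onset of the first spike to the amount of spikes that follow with a max interspike interval of :arg:max_interval
--     """
--     spike_counts = {}
--     for i in range(len(spike_times)):
--         start_t = spike_times[i]
--         n_spikes = 1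
--         while i < len(spike_times) - 1 and spike_times[i+1] < spike_times[i] + max_interval:
--             n_spikes +=1
--             i += 1
--         spike_counts[start_t] = n_spikes
--     return spike_counts
-- ===== SOURCE B (Python) =====
-- def count_spikes(spike_times, max_interval=15):
--     n = len(spike_times)
--     runs = [1] * n
--     for i in range(n - 2, -1, -1):
--         if spike_times[i + 1] < spike_times[i] + max_interval:
--             runs[i] = runs[i + 1] + 1
--     spike_counts = {}
--     for t, r in zip(spike_times, runs):
--         spike_counts[t] = r
--     return spike_counts
-- ===== Notes on version B (the rewrite author's own statement) =====
-- stated objective: faster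
-- what changed: Replaced A's per-start inner rescan of the following spikes with a single backward pass computing all run lengths, then one forward dict-assignment pass over zip(spike_times, runs).
import Mathlib
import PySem

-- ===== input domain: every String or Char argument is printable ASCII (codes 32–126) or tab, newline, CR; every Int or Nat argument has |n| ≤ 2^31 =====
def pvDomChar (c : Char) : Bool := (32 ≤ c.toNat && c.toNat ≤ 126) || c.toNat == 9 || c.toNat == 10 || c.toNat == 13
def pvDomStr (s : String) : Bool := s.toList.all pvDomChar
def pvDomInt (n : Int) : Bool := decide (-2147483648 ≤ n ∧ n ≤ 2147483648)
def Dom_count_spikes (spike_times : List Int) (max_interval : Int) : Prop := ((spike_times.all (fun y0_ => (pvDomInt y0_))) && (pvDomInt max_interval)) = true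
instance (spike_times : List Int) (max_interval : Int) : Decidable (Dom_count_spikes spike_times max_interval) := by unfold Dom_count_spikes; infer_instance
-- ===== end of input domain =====

-- B replaces A's quadratic per-start rescan with one backward pass computing run lengths (objective: faster, O(n^2) → O(n)).


-- ===== PORT A =====
-- the inner 'while' loop of A: i, n_spikes advance while the next spike is close enough
def csWhile (xs : List Int) (mi : Int) (i : Nat) (cnt : Int) : Int :=
  if h : i + 1 < xs.length ∧ xs.getD (i+1) 0 < xs.getD i 0 + mi then
    csWhile xs mi (i+1) (cnt+1)
  else cnt
termination_by xs.length - i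
decreasing_by omega

def count_spikes (spike_times : List Int) (max_interval : Int) : List (Int × Int) :=
  ((List.range spike_times.length).foldl
    (fun d i => d.insert (spike_times.getD i 0) (csWhile spike_times max_interval i 1))
    (PySem.Dict.empty : PySem.Dict Int Int)).items

-- ===== PORT B =====
-- backward pass: run length at each position (runs[i] = runs[i+1]+1 when spikes i,i+1 are close, else 1)
def runLens (mi : Int) : List Int → List Int
  | [] => []
  | [_] => [1]
  | t :: t' :: rest =>
    match runLens mi (t' :: rest) with
    | [] => [1]          -- unreachable: runLens of a nonempty list is nonempty
    | r :: rs => (if t' < t + mi then r + 1 else 1) :: r :: rs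

def count_spikes_alt (spike_times : List Int) (max_interval : Int) : List (Int × Int) :=
  ((spike_times.zip (runLens max_interval spike_times)).foldl
    (fun d p => d.insert p.1 p.2)
    (PySem.Dict.empty : PySem.Dict Int Int)).items

-- ===== PRECONDITION & SPEC =====
def Spec_count_spikes (spike_times : List Int) (max_interval : Int) (out : List (Int × Int)) : Prop := out = count_spikes_alt spike_times max_interval
instance (spike_times : List Int) (max_interval : Int) (out : List (Int × Int)) : Decidable (Spec_count_spikes spike_times max_interval out) := by unfold Spec_count_spikes; infer_instance

-- ===== CLAIM (what is proved, stated in full; the proofs are below) =====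
def Claim_equal_count_spikes : Prop := ∀ (spike_times : List Int) (max_interval : Int), Dom_count_spikes spike_times max_interval → Spec_count_spikes spike_times max_interval (count_spikes spike_times max_interval)

-- ===== LEMMAS AND PROOFS =====

theorem runLens_length (mi : Int) (xs : List Int) : (runLens mi xs).length = xs.length := by
  induction xs with
  | nil => rfl
  | cons t rest ih =>
    cases rest with
    | nil => rfl
    | cons t' rs =>
      rw [runLens]
      cases h : runLens mi (t' :: rs) with
      | nil => simp [h] at ih
      | cons r rs' => simp [h] at ih ⊢; omega

theorem runLens_getD (mi : Int) (xs : List Int) (i : Nat) (hi : i < xs.length) :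
    (runLens mi xs).getD i 1 =
      if i + 1 < xs.length ∧ xs.getD (i+1) 0 < xs.getD i 0 + mi
      then (runLens mi xs).getD (i+1) 1 + 1 else 1 := by
  induction xs generalizing i with
  | nil => simp at hi
  | cons t rest ih =>
    cases rest with
    | nil =>
      simp at hi; subst hi; simp [runLens]
    | cons t' rs =>
      rw [runLens]
      cases h : runLens mi (t' :: rs) with
      | nil => have := runLens_length mi (t' :: rs); simp [h] at this
      | cons r rs' =>
        cases i with
        | zero =>
          simp only [List.getD_cons_zero]
          by_cases hc : t' < t + mi
          · simp [hc, List.length_cons]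
          · simp [hc, List.length_cons]
        | succ j =>
          have hj : j < (t' :: rs).length := by simpa using hi
          have := ih j hj
          rw [h] at this
          simpa using this

theorem csWhile_eq (xs : List Int) (mi : Int) (i : Nat) (cnt : Int) (hi : i < xs.length) :
    csWhile xs mi i cnt = cnt + (runLens mi xs).getD i 1 - 1 := by
  rw [csWhile]
  by_cases h : i + 1 < xs.length ∧ xs.getD (i+1) 0 < xs.getD i 0 + mi
  · rw [dif_pos h, csWhile_eq xs mi (i+1) (cnt+1) h.1, runLens_getD mi xs i hi, if_pos h]
    ring
  · rw [dif_neg h, runLens_getD mi xs i hi, if_neg h]; ring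
termination_by xs.length - i
decreasing_by omega

theorem zip_eq_range_map (xs ys : List Int) (h : ys.length = xs.length) :
    xs.zip ys = (List.range xs.length).map (fun i => (xs.getD i 0, ys.getD i 1)) := by
  induction xs generalizing ys with
  | nil => simp
  | cons x xt ih =>
    cases ys with
    | nil => simp at h
    | cons y yt =>
      simp only [List.zip_cons_cons, List.length_cons, List.range_succ_eq_map,
        List.map_cons, List.map_map]
      rw [ih yt (by simpa using h)]
      simp [Function.comp]

theorem count_spikes_spec_aux (xs : List Int) (mi : Int) :
    count_spikes xs mi = count_spikes_alt xs mi := by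
  unfold count_spikes count_spikes_alt
  congr 1
  have hmap : (List.range xs.length).map (fun i => (xs.getD i 0, csWhile xs mi i 1)) =
      xs.zip (runLens mi xs) := by
    rw [zip_eq_range_map xs (runLens mi xs) (runLens_length mi xs)]
    apply List.map_congr_left
    intro i hi
    rw [List.mem_range] at hi
    rw [csWhile_eq xs mi i 1 hi]
    simp
  calc List.foldl (fun (d : PySem.Dict Int Int) i =>
          d.insert (xs.getD i 0) (csWhile xs mi i 1)) PySem.Dict.empty (List.range xs.length)
      = List.foldl (fun (d : PySem.Dict Int Int) (p : Int × Int) => d.insert p.1 p.2)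
          PySem.Dict.empty
          ((List.range xs.length).map (fun i => (xs.getD i 0, csWhile xs mi i 1))) := by
        rw [List.foldl_map]
    _ = _ := by rw [hmap]

-- ===== VERDICT (by name: the statement is the Claim_ definition above) =====
theorem count_spikes_spec : Claim_equal_count_spikes := by
  intro xs mi _
  unfold Spec_count_spikes
  exact count_spikes_spec_aux xs mi
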